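-- pv_equiv track=rewrite | github.com/weinaike/agentflow | AgentFlow/tools/abstract_syntax_tree.py | format_code_snippets
-- ===== SOURCE A (Python) =====
-- def format_code_snippets(code_snippets):
--     code = ""
--     for file_name, code_snippet in code_snippets.items():
--         if file_name.endswith((".h", ".hpp", ".cuh")):
--             code += "```cpp\n"
--             code += f"//file_name: {file_name}\n"
--             code += code_snippet
--             code += "```\n\n" if code.endswith("\n") else "\n```\n\n"
--     for file_name, code_snippet in code_snippets.items():
--         if not file_name.endswith((".h", ".hpp", ".cuh")):
--             code += "```cpp\n"
--             code += f"//file_name: {file_name}\n"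
--             code += code_snippet
--             code += "```\n\n" if code.endswith("\n") else "\n```\n\n"
--
--     return code
-- ===== SOURCE B (Python) =====
-- def _block(file_name, snippet):
--     tail = "```\n\n" if snippet.endswith("\n") or snippet == "" else "\n```\n\n"
--     return "```cpp\n" + "//file_name: " + file_name + "\n" + snippet + tail
--
--
-- def format_code_snippets(code_snippets):
--     ordered = sorted(code_snippets.items(),
--                      key=lambda kv: 0 if kv[0].endswith((".h", ".hpp", ".cuh")) else 1)
--     return "".join(_block(f, s) for f, s in ordered)
-- ===== Notes on version B (the rewrite author's own statement) =====
-- stated objective: alternative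
-- what changed: Instead of A's two filtered concatenation passes, B formats each entry once into a block (closing fence decided from the snippet alone: ends-in-newline or empty) and orders the blocks by a stable sort on a 0/1 bucket key (header extensions first), then joins; stability preserves per-group insertion order.
import Mathlib
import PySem

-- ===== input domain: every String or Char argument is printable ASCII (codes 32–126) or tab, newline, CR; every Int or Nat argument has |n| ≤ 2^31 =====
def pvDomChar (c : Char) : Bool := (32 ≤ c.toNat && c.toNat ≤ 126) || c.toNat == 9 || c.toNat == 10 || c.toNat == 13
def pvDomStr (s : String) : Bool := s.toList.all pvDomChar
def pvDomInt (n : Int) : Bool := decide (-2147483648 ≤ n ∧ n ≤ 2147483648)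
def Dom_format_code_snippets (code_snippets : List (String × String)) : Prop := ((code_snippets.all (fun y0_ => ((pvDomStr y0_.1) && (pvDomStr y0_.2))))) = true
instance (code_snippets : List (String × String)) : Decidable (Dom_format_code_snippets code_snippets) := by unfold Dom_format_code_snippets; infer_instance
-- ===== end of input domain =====

-- B formats each entry once into a block (closing fence decided from the snippet alone) and
-- orders the blocks by a stable sort on a 0/1 bucket key (headers first), then joins —
-- replacing A's two filtered concatenation passes (alternative decomposition, not faster).

-- ===== PORT A =====
-- file_name.endswith((".h", ".hpp", ".cuh"))
def pvIsHeader (f : String) : Bool :=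
  PySem.Str.endswith f ".h" || PySem.Str.endswith f ".hpp" || PySem.Str.endswith f ".cuh"

-- the body of A's loop: code += … four times, the last conditional on the accumulated string
def pvStepA (code : String) (p : String × String) : String :=
  let code := code ++ "```cpp\n"
  let code := code ++ "//file_name: " ++ p.1 ++ "\n"
  let code := code ++ p.2
  code ++ (if PySem.Str.endswith code "\n" then "```\n\n" else "\n```\n\n")

def format_code_snippets (code_snippets : List (String × String)) : String :=
  let code := code_snippets.foldl
    (fun code p => if pvIsHeader p.1 then pvStepA code p else code) ""
  code_snippets.foldl
    (fun code p => if !pvIsHeader p.1 then pvStepA code p else code) code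

-- ===== PORT B =====
-- _block(file_name, snippet)
def pvBlock (file_name snippet : String) : String :=
  let tail := if PySem.Str.endswith snippet "\n" || snippet == "" then "```\n\n" else "\n```\n\n"
  "```cpp\n" ++ "//file_name: " ++ file_name ++ "\n" ++ snippet ++ tail

-- 0 if kv[0].endswith((".h", ".hpp", ".cuh")) else 1
def pvKey (p : String × String) : Int := if pvIsHeader p.1 then 0 else 1

def format_code_snippets_alt (code_snippets : List (String × String)) : String :=
  let ordered := PySem.List.sorted code_snippets pvKey
  String.join (ordered.map (fun p => pvBlock p.1 p.2))

-- ===== PRECONDITION & SPEC =====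
def Spec_format_code_snippets (code_snippets : List (String × String)) (out : String) : Prop := out = format_code_snippets_alt code_snippets
instance (code_snippets : List (String × String)) (out : String) : Decidable (Spec_format_code_snippets code_snippets out) := by unfold Spec_format_code_snippets; infer_instance

-- ===== CLAIM (what is proved, stated in full; the proofs are below) =====
def Claim_equal_format_code_snippets : Prop := ∀ (code_snippets : List (String × String)), Dom_format_code_snippets code_snippets → Spec_format_code_snippets code_snippets (format_code_snippets code_snippets)

-- ===== LEMMAS AND PROOFS =====

theorem pv_singleton_suffix_iff (a : Char) (l : List Char) : [a] <:+ l ↔ l.getLast? = some a := by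
  constructor
  · rintro ⟨t, rfl⟩
    simp
  · intro h
    rcases List.eq_nil_or_concat l with rfl | ⟨t, b, rfl⟩
    · simp at h
    · simp at h
      exact ⟨t, by simp [h]⟩

theorem pv_endswith_newline (t : String) :
    PySem.Str.endswith t "\n" = decide (t.toList.getLast? = some '\n') := by
  simp only [PySem.Str.endswith_eq]
  have he : ("\n" : String).toList = ['\n'] := rfl
  rw [he]
  by_cases h : ['\n'] <:+ t.toList
  · simp [(PySem.Chars.endswith_iff _ _).mpr h, (pv_singleton_suffix_iff _ _).mp h]
  · have h2 : PySem.Chars.endswith t.toList ['\n'] = false := by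
      by_contra hc
      exact h ((PySem.Chars.endswith_iff _ _).mp (by revert hc; cases PySem.Chars.endswith t.toList ['\n'] <;> simp))
    simp only [h2, eq_comm, false_eq_decide_iff]
    intro hl
    exact h ((pv_singleton_suffix_iff _ _).mpr hl.symm)

-- A's accumulated-string newline test reduces to a property of the snippet alone
theorem pv_endswith_key (c f s : String) :
    PySem.Str.endswith (c ++ "```cpp\n" ++ "//file_name: " ++ f ++ "\n" ++ s) "\n"
      = (PySem.Str.endswith s "\n" || s == "") := by
  rw [pv_endswith_newline, pv_endswith_newline]
  by_cases hs : s = ""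
  · subst hs
    have h : (c ++ "```cpp\n" ++ "//file_name: " ++ f ++ "\n" ++ "").toList
        = (c ++ "```cpp\n" ++ "//file_name: " ++ f).toList ++ ['\n'] := by
      simp
    rw [h, List.getLast?_concat]
    simp
  · have hne : s.toList ≠ [] := by
      simpa [String.toList_eq_nil_iff] using hs
    have hget : (c ++ "```cpp\n" ++ "//file_name: " ++ f ++ "\n" ++ s).toList.getLast? = s.toList.getLast? := by
      have h : (c ++ "```cpp\n" ++ "//file_name: " ++ f ++ "\n" ++ s).toList
          = (c ++ "```cpp\n" ++ "//file_name: " ++ f ++ "\n").toList ++ s.toList := by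
        simp
      rw [h, List.getLast?_append_of_ne_nil _ hne]
    rw [hget]
    simp [hs]

-- hence A's loop body appends exactly B's block
theorem pv_stepA_eq (c : String) (p : String × String) :
    pvStepA c p = c ++ pvBlock p.1 p.2 := by
  unfold pvStepA pvBlock
  simp only []
  rw [pv_endswith_key c p.1 p.2]
  cases hb : (PySem.Str.endswith p.2 "\n" || p.2 == "") <;>
    simp [String.append_assoc]

theorem pv_join_cons (x : String) (l : List String) :
    String.join (x :: l) = x ++ String.join l := by
  have key : ∀ (l : List String) (a : String),
      l.foldl (fun r s => r ++ s) a = a ++ l.foldl (fun r s => r ++ s) "" := by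
    intro l
    induction l with
    | nil => intro a; simp
    | cons y l ih =>
        intro a
        simp only [List.foldl_cons]
        rw [ih (a ++ y), ih ("" ++ y)]
        simp [String.append_assoc]
  simp only [String.join, List.foldl_cons]
  rw [key l ("" ++ x)]
  simp

-- A's folds: accumulate the blocks of the kept files after the accumulator
theorem pv_foldA (P : String × String → Bool) :
    ∀ (l : List (String × String)) (c : String),
      l.foldl (fun code p => if P p then pvStepA code p else code) c
        = c ++ String.join ((l.filter P).map (fun p => pvBlock p.1 p.2)) := by
  intro l
  induction l with
  | nil => intro c; simp [String.join]
  | cons p l ih =>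
      intro c
      by_cases hp : P p = true
      · simp only [List.foldl_cons, hp, if_true, List.filter_cons_of_pos hp,
          List.map_cons, pv_join_cons]
        rw [pv_stepA_eq, ih, String.append_assoc]
      · simp only [Bool.not_eq_true] at hp
        simp [hp, ih, List.filter_cons_of_neg]

-- inserting a key-0 element into (zeros ++ ones) lands right after the zeros
theorem pv_insert_zero (x : String × String) (A B : List (String × String))
    (hx : pvKey x = 0) (hA : ∀ a ∈ A, pvKey a = 0) (hB : ∀ b ∈ B, pvKey b = 1) :
    PySem.List.insertBy (fun a b => decide (pvKey a < pvKey b)) x (A ++ B)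
      = (A ++ [x]) ++ B := by
  induction A with
  | nil =>
      cases B with
      | nil => simp [PySem.List.insertBy]
      | cons b bs =>
          have hb : pvKey b = 1 := hB b (by simp)
          simp [PySem.List.insertBy, hx, hb]
  | cons a as ih =>
      have ha : pvKey a = 0 := hA a (by simp)
      have : PySem.List.insertBy (fun a b => decide (pvKey a < pvKey b)) x (as ++ B)
          = (as ++ [x]) ++ B :=
        ih (fun a ha' => hA a (by simp [ha'])) 
      simp [PySem.List.insertBy, hx, ha, this]

-- inserting a key-1 element goes to the very end
theorem pv_insert_one (x : String × String) (l : List (String × String))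
    (hx : pvKey x = 1) (hl : ∀ a ∈ l, pvKey a = 0 ∨ pvKey a = 1) :
    PySem.List.insertBy (fun a b => decide (pvKey a < pvKey b)) x l = l ++ [x] := by
  apply PySem.List.insertBy_of_forall_not_before
  intro y hy
  rcases hl y hy with h | h <;> simp [hx, h]

-- the stable insertion sort on the 0/1 key is exactly the two-bucket partition
theorem pv_fold_insert :
    ∀ (l A B : List (String × String)),
      (∀ a ∈ A, pvKey a = 0) → (∀ b ∈ B, pvKey b = 1) →
      l.foldl (fun acc x => PySem.List.insertBy (fun a b => decide (pvKey a < pvKey b)) x acc) (A ++ B)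
        = (A ++ l.filter (fun p => pvIsHeader p.1)) ++ (B ++ l.filter (fun p => !pvIsHeader p.1)) := by
  intro l
  induction l with
  | nil => intro A B _ _; simp
  | cons x xs ih =>
      intro A B hA hB
      by_cases hx : pvIsHeader x.1 = true
      · have hk : pvKey x = 0 := by simp [pvKey, hx]
        have hstep := pv_insert_zero x A B hk hA hB
        simp only [List.foldl_cons, hstep]
        rw [ih (A ++ [x]) B
          (by intro a ha; rcases List.mem_append.mp ha with h | h
              · exact hA a h
              · simp at h; subst h; exact hk) hB]
        simp [hx, List.append_assoc]
      · simp only [Bool.not_eq_true] at hx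
        have hk : pvKey x = 1 := by simp [pvKey, hx]
        have hstep := pv_insert_one x (A ++ B) hk
          (by intro a ha; rcases List.mem_append.mp ha with h | h
              · exact Or.inl (hA a h)
              · exact Or.inr (hB a h))
        simp only [List.foldl_cons, hstep]
        have : A ++ B ++ [x] = A ++ (B ++ [x]) := by simp
        rw [this, ih A (B ++ [x]) hA
          (by intro b hb; rcases List.mem_append.mp hb with h | h
              · exact hB b h
              · simp at h; subst h; exact hk)]
        simp [hx, List.append_assoc]

theorem pv_sorted_partition (l : List (String × String)) :
    PySem.List.sorted l pvKey
      = l.filter (fun p => pvIsHeader p.1) ++ l.filter (fun p => !pvIsHeader p.1) := by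
  rw [PySem.List.sorted_eq_foldl_insertBy]
  have := pv_fold_insert l [] [] (by simp) (by simp)
  simpa using this

theorem pv_join_append (a b : List String) : String.join (a ++ b) = String.join a ++ String.join b := by
  induction a with
  | nil => simp [String.join]
  | cons x a ih => simp only [List.cons_append, pv_join_cons, ih, String.append_assoc]

-- ===== VERDICT (by name: the statement is the Claim_ definition above) =====
theorem format_code_snippets_spec : Claim_equal_format_code_snippets := by
  intro l _
  unfold Spec_format_code_snippets format_code_snippets format_code_snippets_alt
  simp only [pv_foldA, pv_sorted_partition, List.map_append, pv_join_append]
  simp
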